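-- pv_equiv track=rewrite | github.com/BrianCLong/summit | analysis/clra.py | prioritize_events
-- ===== SOURCE A (Python) =====
-- from collections.abc import Iterable
--
-- def prioritize_events(
--
--     events: Iterable[str],
--     weights: dict[str, int] | None = None,
-- ) -> list[str]:
--     """Order events using a weighted keyword priority model."""
--
--     if weights is None:
--         weights = {"critical": 3, "urgent": 2, "high": 1}
--
--     def score(event: str) -> tuple[int, str]:
--         for keyword, weight in sorted(weights.items(), key=lambda kv: -kv[1]):
--             if keyword in event.lower():
--                 return (-weight, event)
--         return (0, event)
--
--     return [e for _, e in sorted(score(evt) for evt in events)]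
-- ===== SOURCE B (Python) =====
-- def prioritize_events(events, weights=None):
--     """Order events using a weighted keyword priority model."""
--     if weights is None:
--         weights = {"critical": 3, "urgent": 2, "high": 1}
--
--     buckets = {}
--     for evt in events:
--         low = evt.lower()
--         s = max((w for kw, w in weights.items() if kw in low), default=0)
--         buckets.setdefault(s, []).append(evt)
--
--     out = []
--     for s in sorted(buckets, reverse=True):
--         out.extend(sorted(buckets[s]))
--     return out
-- ===== Notes on version B (the rewrite author's own statement) =====
-- stated objective: alternative
-- what changed: Instead of scoring every event with a sort-the-weights-and-take-first-match scorer and then globally sorting (-weight, event) tuples, B buckets events into a dict keyed by their max matching weight (one unordered scan per event, max with default 0), then walks the distinct scores in descending order and emits each bucket sorted alphabetically.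
import Mathlib
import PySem

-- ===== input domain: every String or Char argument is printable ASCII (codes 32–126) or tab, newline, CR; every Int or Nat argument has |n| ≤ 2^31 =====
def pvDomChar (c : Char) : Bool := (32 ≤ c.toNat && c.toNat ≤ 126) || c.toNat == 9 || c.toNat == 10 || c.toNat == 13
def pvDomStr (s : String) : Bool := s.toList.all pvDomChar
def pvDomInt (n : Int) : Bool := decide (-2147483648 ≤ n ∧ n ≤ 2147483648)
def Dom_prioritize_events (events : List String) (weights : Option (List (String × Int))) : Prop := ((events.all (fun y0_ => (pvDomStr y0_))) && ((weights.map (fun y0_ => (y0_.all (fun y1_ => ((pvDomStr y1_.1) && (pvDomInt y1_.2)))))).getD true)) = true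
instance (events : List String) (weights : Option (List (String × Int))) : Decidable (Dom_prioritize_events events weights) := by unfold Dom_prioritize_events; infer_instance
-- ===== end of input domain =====

-- B replaces A's global sort of (-weight, event) tuples by a group-by: events are bucketed
-- by their max matching weight in a dict, then buckets are emitted in descending score order,
-- each sorted alphabetically — a bucket/group-by algorithm instead of a keyed tuple sort.


-- ===== PORT A =====
-- A's score loop: iterate the weight items sorted by descending weight, return at first match
def pvLoopA (e : String) : List (String × Int) → Int × String
  | [] => (0, e)
  | kv :: t =>
    if PySem.Str.isIn kv.1 (PySem.Str.lower e) then (-kv.2, e) else pvLoopA e t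

def prioritize_events (events : List String) (weights : Option (List (String × Int))) : List String :=
  let ws := weights.getD [("critical", 3), ("urgent", 2), ("high", 1)]
  (PySem.List.sorted2
    (events.map (fun evt => pvLoopA evt (PySem.List.sorted ws (fun kv => -kv.2) false)))
    Prod.fst Prod.snd false).map Prod.snd

-- ===== PORT B =====
-- B's score: one unordered generator scan over the weight items, max(matching, default=0)
def pvScore (ws : List (String × Int)) (e : String) : Int :=
  let low := PySem.Str.lower e
  PySem.List.maxD ((ws.filter (fun kv => PySem.Str.isIn kv.1 low)).map Prod.snd) (fun w => w) 0

-- B's body: group events by score into a dict (setdefault(s, []).append(evt) = modify with default),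
-- then extend the output with each alphabetically sorted bucket, scores in descending order
def prioritize_events_alt (events : List String) (weights : Option (List (String × Int))) : List String :=
  let ws := weights.getD [("critical", 3), ("urgent", 2), ("high", 1)]
  let buckets : PySem.Dict Int (List String) :=
    events.foldl (fun d evt => d.modify (pvScore ws evt) [] (fun b => b ++ [evt])) PySem.Dict.empty
  (PySem.List.sorted buckets.keys (fun s => s) true).foldl
    (fun out s => out ++ PySem.List.sorted (buckets.getD s []) (fun e => e) false) []

-- ===== PRECONDITION & SPEC =====
def Spec_prioritize_events (events : List String) (weights : Option (List (String × Int))) (out : List String) : Prop := out = prioritize_events_alt events weights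
instance (events : List String) (weights : Option (List (String × Int))) (out : List String) : Decidable (Spec_prioritize_events events weights out) := by unfold Spec_prioritize_events; infer_instance

-- ===== CLAIM (what is proved, stated in full; the proofs are below) =====
def Claim_equal_prioritize_events : Prop := ∀ (events : List String) (weights : Option (List (String × Int))), Dom_prioritize_events events weights → Spec_prioritize_events events weights (prioritize_events events weights)

-- ===== LEMMAS AND PROOFS =====

-- "m is Python's max(ms, default=0)" as a value specification
def pvIsMaxD (m : Int) (ms : List Int) : Prop :=
  (ms = [] ∧ m = 0) ∨ (m ∈ ms ∧ ∀ x ∈ ms, x ≤ m)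

theorem pvMaxD_spec (ms : List Int) :
    pvIsMaxD (PySem.List.maxD ms (fun w => w) 0) ms := by
  unfold pvIsMaxD PySem.List.maxD
  cases h : PySem.List.max? ms (fun w => w) with
  | none =>
    exact Or.inl ⟨(PySem.List.max?_eq_none_iff ms _).1 h, rfl⟩
  | some m =>
    exact Or.inr ⟨PySem.List.max?_mem h, fun x hx => PySem.List.max?_isMax h x hx⟩

theorem pvIsMaxD_unique {m m' : Int} {ms ms' : List Int} (hp : ms.Perm ms')
    (h : pvIsMaxD m ms) (h' : pvIsMaxD m' ms') : m = m' := by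
  rcases h with ⟨he, hm⟩ | ⟨hmem, hmax⟩
  · subst he
    rcases h' with ⟨_, hm'⟩ | ⟨hmem', _⟩
    · omega
    · have hnil : ms' = [] := hp.symm.eq_nil
      subst hnil; simp at hmem'
  · rcases h' with ⟨he', _⟩ | ⟨hmem', hmax'⟩
    · subst he'
      have hnil : ms = [] := hp.eq_nil
      subst hnil; simp at hmem
    · exact le_antisymm (hmax' m (hp.mem_iff.1 hmem)) (hmax m' (hp.mem_iff.2 hmem'))

-- A's descending-ordered first-match loop computes (minus) the max of the matching weights
theorem pvLoopA_spec (e : String) (l : List (String × Int))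
    (h : l.Pairwise (fun a b => -a.2 ≤ -b.2)) :
    pvIsMaxD (-(pvLoopA e l).1)
      ((l.filter (fun kv => PySem.Str.isIn kv.1 (PySem.Str.lower e))).map Prod.snd) ∧
    (pvLoopA e l).2 = e := by
  induction l with
  | nil => exact ⟨Or.inl ⟨rfl, by simp [pvLoopA]⟩, rfl⟩
  | cons kv t ih =>
    rcases List.pairwise_cons.1 h with ⟨hhead, htail⟩
    by_cases hm : PySem.Str.isIn kv.1 (PySem.Str.lower e) = true
    · have hl : pvLoopA e (kv :: t) = (-kv.2, e) := by simp only [pvLoopA, if_pos hm]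
      rw [hl, List.filter_cons, if_pos hm]
      refine ⟨Or.inr ⟨by simp, ?_⟩, rfl⟩
      intro x hx
      simp only [List.map_cons, List.mem_cons, List.mem_map, List.mem_filter] at hx
      rcases hx with rfl | ⟨kv', ⟨hkv't, _⟩, rfl⟩
      · simp
      · have := hhead kv' hkv't
        simp only [neg_neg]
        omega
    · have hfe : pvLoopA e (kv :: t) = pvLoopA e t := by simp only [pvLoopA, if_neg hm]
      rw [hfe, List.filter_cons, if_neg hm]
      exact ih htail

-- A's per-event score pair is (-pvScore, event)
theorem pvLoopA_eq (ws : List (String × Int)) (e : String) :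
    pvLoopA e (PySem.List.sorted ws (fun kv => -kv.2) false) = (-(pvScore ws e), e) := by
  set p : String × Int → Bool := fun kv => PySem.Str.isIn kv.1 (PySem.Str.lower e) with hp
  have hs := pvLoopA_spec e (PySem.List.sorted ws (fun kv => -kv.2) false)
    (PySem.List.sorted_pairwise ws (fun kv => -kv.2))
  have hperm : (((PySem.List.sorted ws (fun kv => -kv.2) false).filter p).map Prod.snd).Perm
      ((ws.filter p).map Prod.snd) :=
    ((PySem.List.sorted_perm ws (fun kv => -kv.2) false).filter p).map Prod.snd
  have hval := pvIsMaxD_unique hperm hs.1 (pvMaxD_spec ((ws.filter p).map Prod.snd))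
  have hsc : pvScore ws e = PySem.List.maxD ((ws.filter p).map Prod.snd) (fun w => w) 0 := rfl
  have hfst : (pvLoopA e (PySem.List.sorted ws (fun kv => -kv.2) false)).1 = -(pvScore ws e) := by
    rw [hsc]; omega
  exact Prod.ext hfst hs.2

-- the lexicographic "before" predicate of sorted2 is the strict order of Lex (Int × String)
theorem pv_before_eq (a b : Int × String) :
    (decide (a.1 < b.1) || (!decide (b.1 < a.1) && decide (a.2 < b.2)))
      = decide (toLex a < toLex b) := by
  by_cases h1 : a.1 < b.1 <;> by_cases h2 : b.1 < a.1 <;> by_cases h3 : a.2 < b.2 <;>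
    simp [h1, h2, h3, Prod.Lex.toLex_lt_toLex] <;> omega

-- sorted2 by the tuple key (fst, snd) is sorted by the Lex key
theorem pv_sorted2_eq_sorted_lex (xs : List (Int × String)) :
    PySem.List.sorted2 xs Prod.fst Prod.snd false
      = PySem.List.sorted xs (fun p : Int × String => (toLex p : Lex (Int × String))) false := by
  rw [PySem.List.sorted_eq_foldl_insertBy]
  show List.foldl (fun acc x => PySem.List.insertBy _ x acc) [] xs = _
  congr 1
  funext acc x
  congr 1
  funext a b
  exact pv_before_eq a b

-- flatMap of the per-key filters of l is a permutation of l (K nodup, keys of l covered by K)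
theorem pv_perm_flatMap_filter (k : String → Int) :
    ∀ (K : List Int) (l : List String), K.Nodup → (∀ e ∈ l, k e ∈ K) →
    (K.flatMap (fun s => l.filter (fun e => k e == s))).Perm l := by
  intro K
  induction K with
  | nil =>
    intro l _ hcov
    have : l = [] := List.eq_nil_iff_forall_not_mem.2 (fun e he => by simpa using hcov e he)
    simp [this]
  | cons s K' ih =>
    intro l hnd hcov
    rcases List.nodup_cons.1 hnd with ⟨hs, hnd'⟩
    have hrest : K'.flatMap (fun t => l.filter (fun e => k e == t))
        = K'.flatMap (fun t => (l.filter (fun e => !(k e == s))).filter (fun e => k e == t)) := by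
      apply List.flatMap_congr
      intro t ht
      rw [List.filter_filter]
      apply List.filter_congr
      intro e _
      have hts : t ≠ s := fun h' => hs (h' ▸ ht)
      by_cases h : k e = t
      · simp [h]
        exact hts
      · simp [h]
    have hihcov : ∀ e ∈ l.filter (fun e => !(k e == s)), k e ∈ K' := by
      intro e he
      rcases List.mem_filter.1 he with ⟨hel, hne⟩
      have := hcov e hel
      simp only [List.mem_cons] at this
      rcases this with h | h
      · simp [h] at hne
      · exact h
    have step1 : ((s :: K').flatMap (fun t => l.filter (fun e => k e == t)))
        = l.filter (fun e => k e == s)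
            ++ K'.flatMap (fun t => (l.filter (fun e => !(k e == s))).filter (fun e => k e == t)) := by
      rw [List.flatMap_cons, hrest]
    rw [step1]
    exact ((ih _ hnd' hihcov).append_left _).trans (List.filter_append_perm _ l)


-- pointwise permutations lift to flatMap
theorem pv_perm_flatMap {α β : Type} (K : List α) (f g : α → List β)
    (h : ∀ x ∈ K, (f x).Perm (g x)) : (K.flatMap f).Perm (K.flatMap g) := by
  induction K with
  | nil => simp
  | cons s K' ih =>
    simp only [List.flatMap_cons]
    exact (h s (List.mem_cons_self)).append
      (ih (fun x hx => h x (List.mem_cons_of_mem _ hx)))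

-- the grouped output pairs, strictly descending keys outside, sorted snds inside, are Lex-sorted
theorem pv_pairwise_blocks (k : String → Int) (events : List String) :
    ∀ K : List Int, K.Pairwise (fun s t => t < s) →
    (K.flatMap (fun s => (PySem.List.sorted (events.filter (fun e => k e == s))
        (fun e => e) false).map (fun e => ((-s : Int), e)))).Pairwise
      (fun a b => (toLex a : Lex (Int × String)) ≤ toLex b) := by
  intro K
  induction K with
  | nil => simp
  | cons s K' ih =>
    intro hp
    rcases List.pairwise_cons.1 hp with ⟨hhead, htail⟩
    simp only [List.flatMap_cons]
    rw [List.pairwise_append]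
    refine ⟨?_, ih htail, ?_⟩
    · rw [List.pairwise_map]
      have hps := PySem.List.sorted_pairwise (events.filter (fun e => k e == s)) (fun e : String => e)
      refine List.Pairwise.imp ?_ hps
      intro a b hab
      exact Prod.Lex.toLex_le_toLex.2 (Or.inr ⟨rfl, hab⟩)
    · intro a ha b hb
      rcases List.mem_map.1 ha with ⟨ea, _, rfl⟩
      rcases List.mem_flatMap.1 hb with ⟨t, htK, hbt⟩
      rcases List.mem_map.1 hbt with ⟨eb, _, rfl⟩
      have : t < s := hhead t htK
      exact le_of_lt (Prod.Lex.toLex_lt_toLex.2 (Or.inl (by simp; omega)))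

-- the heart of the equivalence: sorting scored pairs lexicographically = emitting the
-- per-score buckets in descending score order, each alphabetically sorted
theorem pv_main (k : String → Int) (events : List String) :
    (PySem.List.sorted (events.map (fun e => (-(k e), e)))
        (fun p : Int × String => (toLex p : Lex (Int × String))) false).map Prod.snd
      = (PySem.List.sorted (PySem.Set.ofList (events.map k)) (fun s => s) true).flatMap
          (fun s => PySem.List.sorted (events.filter (fun e => k e == s)) (fun e => e) false) := by
  set SK := PySem.List.sorted (PySem.Set.ofList (events.map k)) (fun s : Int => s) true with hSK
  set ps := events.map (fun e => (-(k e), e)) with hps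
  set Bp := SK.flatMap (fun s => (PySem.List.sorted (events.filter (fun e => k e == s))
      (fun e => e) false).map (fun e => ((-s : Int), e))) with hBp
  have hSKperm : SK.Perm (PySem.Set.ofList (events.map k)) := PySem.List.sorted_perm _ _ _
  have hSKnodup : SK.Nodup := hSKperm.nodup_iff.2 (PySem.Set.nodup_ofList _)
  have hSKdesc : SK.Pairwise (fun s t => t < s) := by
    have h1 : SK.Pairwise (fun s t : Int => t ≤ s) := PySem.List.sorted_pairwise_rev _ _
    have h2 : SK.Pairwise (fun s t : Int => s ≠ t) := hSKnodup
    exact (h1.and h2).imp (fun h => lt_of_le_of_ne h.1 (Ne.symm h.2))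
  have hcov : ∀ e ∈ events, k e ∈ SK := by
    intro e he
    rw [hSK, PySem.List.mem_sorted, PySem.Set.mem_ofList]
    exact List.mem_map_of_mem he
  -- Bp is a permutation of ps
  have hperm : Bp.Perm ps := by
    have h1 : Bp.Perm (SK.flatMap (fun s => (events.filter (fun e => k e == s)).map
        (fun e => ((-s : Int), e)))) :=
      pv_perm_flatMap _ _ _ (fun s _ => (PySem.List.sorted_perm _ _ _).map _)
    have h2 : SK.flatMap (fun s => (events.filter (fun e => k e == s)).map
        (fun e => ((-s : Int), e)))
        = (SK.flatMap (fun s => events.filter (fun e => k e == s))).map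
            (fun e => (-(k e), e)) := by
      rw [List.map_flatMap]
      apply List.flatMap_congr
      intro s _
      apply List.map_congr_left
      intro e he
      have : k e = s := by simpa using (List.mem_filter.1 he).2
      rw [this]
    have h3 : (SK.flatMap (fun s => events.filter (fun e => k e == s))).Perm events :=
      pv_perm_flatMap_filter k SK events hSKnodup hcov
    exact h1.trans (by rw [h2]; exact h3.map _)
  -- both are Lex-sorted, hence equal
  have heq : PySem.List.sorted ps (fun p : Int × String => (toLex p : Lex (Int × String))) false
      = Bp := by
    apply PySem.List.eq_of_perm_of_pairwise_le_of_injective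
      (fun p : Int × String => (toLex p : Lex (Int × String))) toLex.injective
      ((PySem.List.sorted_perm _ _ _).trans hperm.symm)
      (PySem.List.sorted_pairwise _ _)
      (pv_pairwise_blocks k events SK hSKdesc)
  rw [heq, hBp, List.map_flatMap]
  apply List.flatMap_congr
  intro s _
  simp

-- ===== VERDICT (by name: the statement is the Claim_ definition above) =====
theorem prioritize_events_spec : Claim_equal_prioritize_events := by
  intro events weights _
  unfold Spec_prioritize_events
  show prioritize_events events weights = prioritize_events_alt events weights
  simp only [prioritize_events, prioritize_events_alt]
  set ws := weights.getD [("critical", 3), ("urgent", 2), ("high", 1)] with hws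
  set k : String → Int := fun e => pvScore ws e with hk
  -- A side: score pairs, tuple sort = Lex sort
  have hA : events.map (fun evt => pvLoopA evt (PySem.List.sorted ws (fun kv => -kv.2) false))
      = events.map (fun e => (-(k e), e)) :=
    List.map_congr_left fun e _ => pvLoopA_eq ws e
  rw [hA, pv_sorted2_eq_sorted_lex]
  -- B side: the dict groups events by score
  have hkeys : (events.foldl (fun d evt => d.modify (pvScore ws evt) []
      (fun b => b ++ [evt])) (PySem.Dict.empty : PySem.Dict Int (List String))).keys
      = PySem.Set.ofList (events.map k) := by
    rw [PySem.Dict.keys_foldl_modify_key events (fun evt => pvScore ws evt) []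
      (fun _ x => (fun b => b ++ [x]))]
    rfl
  have hbucket : ∀ s : Int, (events.foldl (fun d evt => d.modify (pvScore ws evt) []
      (fun b => b ++ [evt])) (PySem.Dict.empty : PySem.Dict Int (List String))).getD s []
      = events.filter (fun e => k e == s) := by
    intro s
    have hfold : events.foldl (fun d evt => d.modify (pvScore ws evt) [] (fun b => b ++ [evt]))
        (PySem.Dict.empty : PySem.Dict Int (List String))
        = (events.map (fun e => (k e, e))).foldl
            (fun d p => d.modify p.1 [] (fun b => b ++ [p.2])) PySem.Dict.empty := by
      rw [List.foldl_map]
    rw [hfold, PySem.Dict.getD_foldl_modify_append, PySem.Dict.getD_empty]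
    simp [List.filter_map, Function.comp_def]
  rw [hkeys]
  rw [PySem.List.foldl_append_eq_flatMap]
  rw [List.nil_append]
  have hflat : List.flatMap (fun s => PySem.List.sorted
        ((List.foldl (fun d evt => d.modify (pvScore ws evt) [] fun b => b ++ [evt])
          PySem.Dict.empty events).getD s []) (fun e => e) false)
      (PySem.List.sorted (PySem.Set.ofList (List.map k events)) (fun s => s) true)
      = List.flatMap (fun s => PySem.List.sorted (events.filter (fun e => k e == s))
          (fun e => e) false)
        (PySem.List.sorted (PySem.Set.ofList (List.map k events)) (fun s => s) true) :=
    List.flatMap_congr (fun s _ => by rw [hbucket s])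
  rw [hflat]
  exact pv_main k events
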